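-- pv_equiv track=rewrite | github.com/bekirdag/gpt-creator | scripts/python/discovery_fill_defaults.py | parse_found_section
-- ===== SOURCE A (Python) =====
-- from typing import Iterable
--
-- def parse_found_section(lines: Iterable[str]) -> tuple[list[str], dict[str, str]]:
--     entries: dict[str, str] = {}
--     order: list[str] = []
--     seen: set[str] = set()
--     in_found = False
--     base_indent: int | None = None
--
--     for raw in lines:
--         stripped = raw.strip()
--         if not stripped:
--             continue
--         if stripped == "found:" and raw.lstrip() == stripped:
--             in_found = True
--             base_indent = None
--             continue
--         if not in_found:
--             continue
--         indent = len(raw) - len(raw.lstrip())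
--         if base_indent is None:
--             if indent <= 0:
--                 in_found = False
--                 continue
--             base_indent = indent
--         if indent < base_indent or not stripped or ":" not in stripped:
--             in_found = False
--             continue
--         key, value = stripped.split(":", 1)
--         key = key.strip()
--         value = value.strip()
--         entries[key] = value
--         if key not in seen:
--             order.append(key)
--             seen.add(key)
--
--     return order, entries
-- ===== SOURCE B (Python) =====
-- def _section_pairs(tail):
--     """Entry pairs of the 'found:' section whose header line immediately precedes tail."""
--     if not tail or tail[0][2] or tail[0][1] <= 0:
--         return []
--     base = tail[0][1]
--     out = []
--     for stripped, indent, is_header in tail: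
--         if is_header or indent < base or ":" not in stripped:
--             break
--         k, v = stripped.split(":", 1)
--         out.append((k.strip(), v.strip()))
--     return out
--
--
-- def parse_found_section(lines):
--     # Stage 1: tabulate the non-blank lines as (stripped, indent, is_header) rows.
--     rows = [(s, len(raw) - len(raw.lstrip()), s == "found:" and raw.lstrip() == s)
--             for raw in lines if (s := raw.strip())]
--     # Stage 2: each header's section is the maximal valid run right after it,
--     # independent of every other section.
--     pairs = [p for i, row in enumerate(rows) if row[2]
--              for p in _section_pairs(rows[i + 1:])]
--     # Stage 3: build the dict; its insertion order is first-occurrence order.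
--     entries = {}
--     for k, v in pairs:
--         entries[k] = v
--     return list(entries), entries
-- ===== Notes on version B (the rewrite author's own statement) =====
-- stated objective: alternative
-- what changed: B replaces A's single-pass in_found/base_indent state machine by a staged pipeline: it first tabulates the non-blank lines as (stripped, indent, is_header) rows, then extracts each header's section independently as the maximal valid run of rows right after it, and finally folds the collected pairs into the dict whose insertion order is the key order.
import Mathlib
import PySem

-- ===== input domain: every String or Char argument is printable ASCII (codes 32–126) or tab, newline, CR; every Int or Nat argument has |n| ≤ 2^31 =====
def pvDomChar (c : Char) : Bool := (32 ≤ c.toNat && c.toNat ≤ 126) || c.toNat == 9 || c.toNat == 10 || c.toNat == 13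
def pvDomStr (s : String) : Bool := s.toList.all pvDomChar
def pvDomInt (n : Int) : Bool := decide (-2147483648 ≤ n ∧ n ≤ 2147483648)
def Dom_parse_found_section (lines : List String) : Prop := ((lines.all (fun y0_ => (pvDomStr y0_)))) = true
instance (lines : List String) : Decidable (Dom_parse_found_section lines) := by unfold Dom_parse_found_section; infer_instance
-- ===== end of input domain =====

-- B replaces A's single-pass in_found/base_indent state machine by a staged pipeline: tabulate the
-- non-blank lines as (stripped, indent, is_header) rows, then treat each header's section as an
-- independent maximal run right after it, then build the dict (objective: alternative).

-- ===== PORT A =====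
-- A's for-loop as structural recursion; the mutated locals entries/order/seen/in_found/base_indent are the parameters
def parseALoop (lines : List String) (entries : PySem.Dict String String) (order : List String)
    (seen : PySem.Set String) (in_found : Bool) (base_indent : Option Int) :
    List String × PySem.Dict String String :=
  match lines with
  | [] => (order, entries)
  | raw :: rest =>
    let stripped := PySem.Str.strip raw
    if stripped = "" then
      parseALoop rest entries order seen in_found base_indent
    else if stripped = "found:" ∧ PySem.Str.lstrip raw = stripped then
      parseALoop rest entries order seen true none
    else if in_found = false then
      parseALoop rest entries order seen in_found base_indent
    else
      let indent : Int := (PySem.Str.len raw : Int) - (PySem.Str.len (PySem.Str.lstrip raw) : Int)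
      match base_indent with
      | none =>
        if indent ≤ 0 then
          parseALoop rest entries order seen false none
        else
          -- base_indent := indent; then the common guard (indent < indent is False)
          if indent < indent ∨ stripped = "" ∨ ¬ (PySem.Str.isIn ":" stripped = true) then
            parseALoop rest entries order seen false (some indent)
          else
            match PySem.Str.splitMax? stripped ":" 1 with
            | some (k :: v :: _) =>
              let key := PySem.Str.strip k
              let value := PySem.Str.strip v
              parseALoop rest (entries.insert key value)
                (if seen.contains key then order else order ++ [key])
                (seen.add key) true (some indent)
            | _ => parseALoop rest entries order seen true (some indent) -- unreachable: ':' ∈ stripped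
      | some bi =>
        if indent < bi ∨ stripped = "" ∨ ¬ (PySem.Str.isIn ":" stripped = true) then
          parseALoop rest entries order seen false (some bi)
        else
          match PySem.Str.splitMax? stripped ":" 1 with
          | some (k :: v :: _) =>
            let key := PySem.Str.strip k
            let value := PySem.Str.strip v
            parseALoop rest (entries.insert key value)
              (if seen.contains key then order else order ++ [key])
              (seen.add key) true (some bi)
          | _ => parseALoop rest entries order seen true (some bi) -- unreachable

def parse_found_section (lines : List String) : List String × (List (String × String)) :=
  let st := parseALoop lines PySem.Dict.empty [] PySem.Set.empty false none
  (st.1, st.2.items)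

-- ===== PORT B =====
-- Stage 1 row: (stripped, indent, is_header); blank lines yield none
def pvRow (raw : String) : Option (String × Int × Bool) :=
  let s := PySem.Str.strip raw
  if s = "" then none
  else some (s, (PySem.Str.len raw : Int) - (PySem.Str.len (PySem.Str.lstrip raw) : Int),
             decide (s = "found:" ∧ PySem.Str.lstrip raw = s))

-- the for-loop of _section_pairs: maximal run of valid entry rows
def takeRunB (base : Int) : List (String × Int × Bool) → List (String × String)
  | [] => []
  | (s, ind, hd) :: rest =>
    if hd = true ∨ ind < base ∨ ¬ (PySem.Str.isIn ":" s = true) then []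
    else
      match PySem.Str.splitMax? s ":" 1 with
      | some (k :: v :: _) => (PySem.Str.strip k, PySem.Str.strip v) :: takeRunB base rest
      | _ => takeRunB base rest -- unreachable: ':' ∈ s

-- _section_pairs(tail)
def sectionPairsB : List (String × Int × Bool) → List (String × String)
  | [] => []
  | (s, ind, hd) :: rest =>
    if hd = true ∨ ind ≤ 0 then []
    else takeRunB ind ((s, ind, hd) :: rest)

def parse_found_section_alt (lines : List String) : List String × (List (String × String)) :=
  let rows := lines.filterMap pvRow
  let pairs := (PySem.List.enumerate rows 0).flatMap
    (fun p => if p.2.2.2 = true then sectionPairsB (PySem.List.slice rows (some (p.1 + 1)) none) else [])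
  let entries := pairs.foldl (fun d q => d.insert q.1 q.2) (PySem.Dict.empty : PySem.Dict String String)
  (entries.keys, entries.items)

-- ===== PRECONDITION & SPEC =====
def Spec_parse_found_section (lines : List String) (out : List String × (List (String × String))) : Prop := out = parse_found_section_alt lines
instance (lines : List String) (out : List String × (List (String × String))) : Decidable (Spec_parse_found_section lines out) := by unfold Spec_parse_found_section; infer_instance

-- ===== CLAIM (what is proved, stated in full; the proofs are below) =====
def Claim_equal_parse_found_section : Prop := ∀ (lines : List String), Dom_parse_found_section lines → Spec_parse_found_section lines (parse_found_section lines)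

-- ===== LEMMAS AND PROOFS =====

-- A's machine, re-expressed as a pair emitter (same control flow, no dict/order/seen state)
def foundPairs : List String → Bool → Option Int → List (String × String)
  | [], _, _ => []
  | raw :: rest, in_found, base_indent =>
    let stripped := PySem.Str.strip raw
    if stripped = "" then
      foundPairs rest in_found base_indent
    else if stripped = "found:" ∧ PySem.Str.lstrip raw = stripped then
      foundPairs rest true none
    else if in_found = false then
      foundPairs rest in_found base_indent
    else
      let indent : Int := (PySem.Str.len raw : Int) - (PySem.Str.len (PySem.Str.lstrip raw) : Int)
      match base_indent with
      | none =>
        if indent ≤ 0 then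
          foundPairs rest false none
        else
          if indent < indent ∨ stripped = "" ∨ ¬ (PySem.Str.isIn ":" stripped = true) then
            foundPairs rest false (some indent)
          else
            match PySem.Str.splitMax? stripped ":" 1 with
            | some (k :: v :: _) =>
              (PySem.Str.strip k, PySem.Str.strip v) :: foundPairs rest true (some indent)
            | _ => foundPairs rest true (some indent)
      | some bi =>
        if indent < bi ∨ stripped = "" ∨ ¬ (PySem.Str.isIn ":" stripped = true) then
          foundPairs rest false (some bi)
        else
          match PySem.Str.splitMax? stripped ":" 1 with
          | some (k :: v :: _) =>
            (PySem.Str.strip k, PySem.Str.strip v) :: foundPairs rest true (some bi)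
          | _ => foundPairs rest true (some bi)

-- all section pairs of a row list, recursively (B's stage 2 in recursive form)
def pairsRec : List (String × Int × Bool) → List (String × String)
  | [] => []
  | (_, _, hd) :: rest => (if hd = true then sectionPairsB rest else []) ++ pairsRec rest

theorem set_contains_add_eq {seen : PySem.Set String} {d : PySem.Dict String String}
    (hinv : ∀ k, seen.contains k = d.contains k) (key value : String) :
    ∀ k, (seen.add key).contains k = (d.insert key value).contains k := by
  intro k
  rw [PySem.Dict.contains_insert, ← hinv k]
  by_cases hk : k = key
  · subst hk
    simp [PySem.Set.mem_add]
  · have hbk : (k == key) = false := by simp [hk]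
    rw [hbk, Bool.false_or]
    have : ((seen.add key).contains k = true) ↔ (seen.contains k = true) := by
      rw [PySem.Set.contains_iff, PySem.Set.contains_iff, PySem.Set.mem_add]
      constructor
      · rintro (h | h)
        · exact h
        · exact absurd h hk
      · exact Or.inl
    exact Bool.coe_iff_coe.mp this

theorem keys_after_insert {d : PySem.Dict String String} {seen : PySem.Set String}
    (hseen : ∀ k, seen.contains k = d.contains k) (key value : String) :
    (if seen.contains key then d.keys else d.keys ++ [key]) = (d.insert key value).keys := by
  rw [hseen]
  by_cases hc : d.contains key = true
  · rw [hc, if_pos rfl, PySem.Dict.keys_insert_of_contains d value hc]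
  · rw [Bool.not_eq_true] at hc
    rw [hc, if_neg (by simp), PySem.Dict.keys_insert_of_not_contains d value hc]

theorem loop_eq (lines : List String) :
    ∀ (d : PySem.Dict String String) (ord : List String) (seen : PySem.Set String)
      (f : Bool) (b : Option Int),
      ord = d.keys → (∀ k, seen.contains k = d.contains k) →
      parseALoop lines d ord seen f b =
        (((foundPairs lines f b).foldl (fun d p => d.insert p.1 p.2) d).keys,
         (foundPairs lines f b).foldl (fun d p => d.insert p.1 p.2) d) := by
  induction lines with
  | nil =>
    intro d ord seen f b hord hseen
    simp [parseALoop, foundPairs, hord]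
  | cons raw rest ih =>
    intro d ord seen f b hord hseen
    subst hord
    rw [parseALoop, foundPairs]
    split_ifs with h1 h2 h3
    · exact ih d _ seen f b rfl hseen
    · exact ih d _ seen true none rfl hseen
    · exact ih d _ seen f b rfl hseen
    · cases b with
      | none =>
        dsimp only
        split_ifs with h4 h5
        · exact ih d _ seen false none rfl hseen
        · exact ih d _ seen false _ rfl hseen
        · cases hsp : PySem.Str.splitMax? (PySem.Str.strip raw) ":" 1 with
          | none => exact ih d _ seen true _ rfl hseen
          | some l =>
            match l with
            | [] => exact ih d _ seen true _ rfl hseen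
            | [_] => exact ih d _ seen true _ rfl hseen
            | k :: v :: t =>
              rw [List.foldl_cons]
              exact ih _ _ _ true _ (keys_after_insert hseen _ _)
                (set_contains_add_eq hseen _ _)
      | some bi =>
        dsimp only
        split_ifs with h4
        · exact ih d _ seen false _ rfl hseen
        · cases hsp : PySem.Str.splitMax? (PySem.Str.strip raw) ":" 1 with
          | none => exact ih d _ seen true _ rfl hseen
          | some l =>
            match l with
            | [] => exact ih d _ seen true _ rfl hseen
            | [_] => exact ih d _ seen true _ rfl hseen
            | k :: v :: t =>
              rw [List.foldl_cons]
              exact ih _ _ _ true _ (keys_after_insert hseen _ _)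
                (set_contains_add_eq hseen _ _)

-- The three-state correspondence between A's machine (on lines) and B's per-section view (on rows).
theorem machine_eq (lines : List String) :
    (∀ b, foundPairs lines false b = pairsRec (lines.filterMap pvRow)) ∧
    (foundPairs lines true none =
      sectionPairsB (lines.filterMap pvRow) ++ pairsRec (lines.filterMap pvRow)) ∧
    (∀ bi, foundPairs lines true (some bi) =
      takeRunB bi (lines.filterMap pvRow) ++ pairsRec (lines.filterMap pvRow)) := by
  induction lines with
  | nil => exact ⟨fun _ => rfl, rfl, fun _ => rfl⟩
  | cons raw rest ih =>
    by_cases hs : PySem.Str.strip raw = ""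
    · have hrow : pvRow raw = none := by simp [pvRow, hs]
      simp only [List.filterMap_cons, hrow]
      refine ⟨fun b => ?_, ?_, fun bi => ?_⟩
      · rw [foundPairs]; simp only [if_pos hs]; exact ih.1 b
      · rw [foundPairs]; simp only [if_pos hs]; exact ih.2.1
      · rw [foundPairs]; simp only [if_pos hs]; exact ih.2.2 bi
    · by_cases hh : (PySem.Str.strip raw = "found:" ∧ PySem.Str.lstrip raw = PySem.Str.strip raw)
      · -- header row
        have hrow : pvRow raw = some (PySem.Str.strip raw,
            (PySem.Str.len raw : Int) - (PySem.Str.len (PySem.Str.lstrip raw) : Int), true) := by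
          simp [pvRow, hh]
        simp only [List.filterMap_cons, hrow]
        refine ⟨fun b => ?_, ?_, fun bi => ?_⟩
        · rw [foundPairs]; simp only [if_neg hs, if_pos hh]
          rw [pairsRec, if_pos rfl]; exact ih.2.1
        · rw [foundPairs]; simp only [if_neg hs, if_pos hh]
          rw [sectionPairsB, if_pos (Or.inl rfl), pairsRec, if_pos rfl, List.nil_append]
          exact ih.2.1
        · rw [foundPairs]; simp only [if_neg hs, if_pos hh]
          rw [takeRunB, if_pos (Or.inl rfl), pairsRec, if_pos rfl, List.nil_append]
          exact ih.2.1
      · -- ordinary row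
        have hrow : pvRow raw = some (PySem.Str.strip raw,
            (PySem.Str.len raw : Int) - (PySem.Str.len (PySem.Str.lstrip raw) : Int), false) := by
          simp [pvRow, hs, hh]
        simp only [List.filterMap_cons, hrow]
        set ind : Int := (PySem.Str.len raw : Int) - (PySem.Str.len (PySem.Str.lstrip raw) : Int)
          with hind
        refine ⟨fun b => ?_, ?_, fun bi => ?_⟩
        · -- state (false, b): row skipped
          rw [foundPairs]
          simp only [if_neg hs, if_neg hh]
          rw [pairsRec]
          simp only [Bool.false_eq_true, if_false, List.nil_append]
          exact ih.1 b
        · -- state (true, none)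
          rw [foundPairs]
          simp only [if_neg hs, if_neg hh]
          rw [pairsRec]
          simp only [Bool.false_eq_true, if_false, List.nil_append]
          by_cases hle : ind ≤ 0
          · rw [if_pos hle, sectionPairsB,
              if_pos (show (false = true ∨ ind ≤ 0) from Or.inr hle), List.nil_append]
            exact ih.1 none
          · rw [if_neg hle, sectionPairsB,
              if_neg (show ¬ (false = true ∨ ind ≤ 0) from by
                push Not; exact ⟨Bool.false_ne_true, lt_of_not_ge hle⟩), takeRunB]
            by_cases hcol : PySem.Str.isIn ":" (PySem.Str.strip raw) = true
            · rw [if_neg (show ¬ (ind < ind ∨ PySem.Str.strip raw = "" ∨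
                  ¬ (PySem.Str.isIn ":" (PySem.Str.strip raw) = true)) from by
                    push Not; exact ⟨le_refl ind, hs, hcol⟩),
                if_neg (show ¬ (false = true ∨ ind < ind ∨
                  ¬ (PySem.Str.isIn ":" (PySem.Str.strip raw) = true)) from by
                    push Not; exact ⟨Bool.false_ne_true, le_refl ind, hcol⟩)]
              cases hsp : PySem.Str.splitMax? (PySem.Str.strip raw) ":" 1 with
              | none => exact ih.2.2 ind
              | some l =>
                match l with
                | [] => exact ih.2.2 ind
                | [_] => exact ih.2.2 ind
                | k :: v :: t =>
                  rw [List.cons_append]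
                  exact congrArg (List.cons _) (ih.2.2 ind)
            · rw [if_pos (show (ind < ind ∨ PySem.Str.strip raw = "" ∨
                  ¬ (PySem.Str.isIn ":" (PySem.Str.strip raw) = true)) from
                    Or.inr (Or.inr hcol)),
                if_pos (show (false = true ∨ ind < ind ∨
                  ¬ (PySem.Str.isIn ":" (PySem.Str.strip raw) = true)) from
                    Or.inr (Or.inr hcol)), List.nil_append]
              exact ih.1 (some ind)
        · -- state (true, some bi)
          rw [foundPairs]
          simp only [if_neg hs, if_neg hh]
          rw [pairsRec]
          simp only [Bool.false_eq_true, if_false, List.nil_append]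
          rw [takeRunB]
          by_cases hg : ind < bi ∨ ¬ (PySem.Str.isIn ":" (PySem.Str.strip raw) = true)
          · rw [if_pos (show (ind < bi ∨ PySem.Str.strip raw = "" ∨
                ¬ (PySem.Str.isIn ":" (PySem.Str.strip raw) = true)) from
                  hg.elim Or.inl (fun h => Or.inr (Or.inr h))),
              if_pos (show (false = true ∨ ind < bi ∨
                ¬ (PySem.Str.isIn ":" (PySem.Str.strip raw) = true)) from
                  Or.inr (hg.elim Or.inl Or.inr)),
              List.nil_append]
            exact ih.1 (some bi)
          · push Not at hg
            rw [if_neg (show ¬ (ind < bi ∨ PySem.Str.strip raw = "" ∨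
                ¬ (PySem.Str.isIn ":" (PySem.Str.strip raw) = true)) from by
                  push Not; exact ⟨hg.1, hs, hg.2⟩),
              if_neg (show ¬ (false = true ∨ ind < bi ∨
                ¬ (PySem.Str.isIn ":" (PySem.Str.strip raw) = true)) from by
                  push Not; exact ⟨Bool.false_ne_true, hg.1, hg.2⟩)]
            cases hsp : PySem.Str.splitMax? (PySem.Str.strip raw) ":" 1 with
            | none => exact ih.2.2 bi
            | some l =>
              match l with
              | [] => exact ih.2.2 bi
              | [_] => exact ih.2.2 bi
              | k :: v :: t =>
                rw [List.cons_append]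
                exact congrArg (List.cons _) (ih.2.2 bi)

theorem flatMap_pairs (rows : List (String × Int × Bool)) :
    ∀ pre : List (String × Int × Bool),
      (PySem.List.enumerate rows (pre.length : Int)).flatMap
        (fun p => if p.2.2.2 = true then
            sectionPairsB (PySem.List.slice (pre ++ rows) (some (p.1 + 1)) none) else []) =
      pairsRec rows := by
  induction rows with
  | nil => intro pre; simp [PySem.List.enumerate, pairsRec]
  | cons r rest ih =>
    intro pre
    obtain ⟨s, ind, hd⟩ := r
    rw [PySem.List.enumerate_cons, List.flatMap_cons]
    have hsl : PySem.List.slice (pre ++ (s, ind, hd) :: rest) (some ((pre.length : Int) + 1)) none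
        = rest := by
      have : ((pre.length : Int) + 1) = ((pre.length + 1 : Nat) : Int) := by push_cast; ring
      rw [this, PySem.List.slice_from_natCast]
      simp
    have hih := ih (pre ++ [(s, ind, hd)])
    have hpre : pre ++ [(s, ind, hd)] ++ rest = pre ++ (s, ind, hd) :: rest := by
      simp
    rw [hpre] at hih
    have hlen : ((pre ++ [(s, ind, hd)]).length : Int) = (pre.length : Int) + 1 := by
      simp
    rw [hlen] at hih
    rw [hih, hsl, pairsRec]

-- ===== VERDICT (by name: the statement is the Claim_ definition above) =====
theorem parse_found_section_spec : Claim_equal_parse_found_section := by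
  intro lines _
  unfold Spec_parse_found_section parse_found_section parse_found_section_alt
  rw [loop_eq lines PySem.Dict.empty [] PySem.Set.empty false none
    (by simp [PySem.Dict.keys_empty]) (by intro k; simp [PySem.Set.empty, PySem.Set.contains])]
  have h1 := (machine_eq lines).1 none
  have h2 := flatMap_pairs (lines.filterMap pvRow) []
  simp only [List.nil_append, List.length_nil, Nat.cast_zero] at h2
  rw [h1, ← h2]
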